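-- pv_equiv track=rewrite | github.com/GOLAJ-Enterprises/SP-14-Blue-Chess-AI | bitboarder/mask_gens.py | gen_ray_mask
-- ===== SOURCE A (Python) =====
-- def gen_ray_mask(square: int, df: int, dr: int) -> int:
--     """Generates ray bit masks from a position on the chessboard,
--     from a direction, `df` and `dr`, a ray from and excluding the position to
--     the edge of the board in the direction.
--
--     :param int square: The square to generate the ray from.
--     :param int df: Delta file (0, 1, -1). Indicates which direction to go column-wise.
--     :param int dr: Delta row (0, 1, -1). Indicates which direction to go row-wise.
--     :return int: The ray mask.
--     """
--     # Decode square index into (file, rank)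
--     file = square % 8
--     rank = square // 8
--     mask = 0
--     step = 1
--
--     # Traverse in the given (df, dr) direction until off-board
--     while (
--         0 <= (new_file := file + df * step) < 8
--         and 0 <= (new_rank := rank + dr * step) < 8
--     ):
--         # Convert (file, rank) back to square index and set the bit
--         target_sq = new_rank * 8 + new_file
--         mask |= 1 << target_sq
--         step += 1
--
--     return mask
-- ===== SOURCE B (Python) =====
-- def gen_ray_mask(square: int, df: int, dr: int) -> int:
--     """Ray mask from `square` in direction (df, dr), excluding the square itself."""
--
--     def run(c, d):
--         # Number of consecutive steps s = 1, 2, ... keeping 0 <= c + d*s < 8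
--         # (a ray on the board never exceeds 8 steps, so 8 stands in for "unbounded").
--         if d == 0:
--             return 8 if 0 <= c < 8 else 0
--         if not 0 <= c + d < 8:
--             return 0
--         return (7 - c) // d if d > 0 else c // -d
--
--     n = min(run(square % 8, df), run(square // 8, dr))
--     delta = 8 * dr + df
--     mask = 0
--     for s in range(1, n + 1):
--         mask |= 1 << (square + s * delta)
--     return mask
-- ===== Notes on version B (the rewrite author's own statement) =====
-- stated objective: alternative
-- what changed: B computes the ray length in closed form (per-coordinate floor-division step counts, min of the two) and then sets the bits of squares square + s*(8*dr+df) for s = 1..n in one unconditional pass, instead of A's step-by-step coordinate walk with an in-loop bounds test; Pre_ excludes df=dr=0 with 0 <= square < 64, where A's while-loop never terminates.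
import Mathlib
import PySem

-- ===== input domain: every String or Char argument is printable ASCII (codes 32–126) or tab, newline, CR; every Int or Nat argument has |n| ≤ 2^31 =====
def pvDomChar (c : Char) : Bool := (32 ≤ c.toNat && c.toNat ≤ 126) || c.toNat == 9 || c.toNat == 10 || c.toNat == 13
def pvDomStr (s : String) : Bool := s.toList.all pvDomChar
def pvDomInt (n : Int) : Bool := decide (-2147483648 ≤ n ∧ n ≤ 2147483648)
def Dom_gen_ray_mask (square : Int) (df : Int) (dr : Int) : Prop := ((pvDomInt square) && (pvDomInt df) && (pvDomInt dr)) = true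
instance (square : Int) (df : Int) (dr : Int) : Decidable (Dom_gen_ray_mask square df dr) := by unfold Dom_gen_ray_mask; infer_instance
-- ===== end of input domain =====

-- B replaces A's step-by-step coordinate walk by a closed-form ray length and one
-- unconditional bit-setting pass (objective: alternative, same cost).

-- ===== PORT A =====
-- A's while-loop; fuel 64 is enough: inside Pre_ the loop runs at most 8 iterations
-- (proved below); outside Pre_ the Python loop never terminates.
def genRayLoopA (file rank df dr : Int) : Nat → Int → Int → Int
  | 0, _, mask => mask
  | fuel+1, step, mask =>
    if 0 ≤ file + df * step ∧ file + df * step < 8 ∧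
       0 ≤ rank + dr * step ∧ rank + dr * step < 8 then
      genRayLoopA file rank df dr fuel (step + 1)
        (PySem.Int.bor mask ((1 : Int) <<< ((rank + dr * step) * 8 + (file + df * step)).toNat))
    else mask

def gen_ray_mask (square : Int) (df : Int) (dr : Int) : Int :=
  genRayLoopA (PySem.Int.mod square 8) (PySem.Int.floordiv square 8) df dr 64 1 0

-- ===== PORT B =====
-- number of consecutive steps s = 1, 2, ... keeping 0 <= c + d*s < 8 (8 = "unbounded")
def runSteps (c d : Int) : Int :=
  if d = 0 then (if 0 ≤ c ∧ c < 8 then 8 else 0)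
  else if ¬ (0 ≤ c + d ∧ c + d < 8) then 0
  else if 0 < d then PySem.Int.floordiv (7 - c) d
  else PySem.Int.floordiv c (-d)

def gen_ray_mask_alt (square : Int) (df : Int) (dr : Int) : Int :=
  let n := min (runSteps (PySem.Int.mod square 8) df)
               (runSteps (PySem.Int.floordiv square 8) dr)
  let delta := 8 * dr + df
  (PySem.List.pyRange 1 (n + 1) 1).foldl
    (fun mask s => PySem.Int.bor mask ((1 : Int) <<< (square + s * delta).toNat)) 0

-- ===== PRECONDITION & SPEC =====
-- Pre_ excludes exactly df = dr = 0 with 0 ≤ square < 64: there A's while-loop never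
-- terminates (the step stays on the board forever), so A returns on no such input.
def Pre_gen_ray_mask (square : Int) (df : Int) (dr : Int) : Prop :=
  ¬ (df = 0 ∧ dr = 0 ∧ 0 ≤ square ∧ square < 64)
instance (square : Int) (df : Int) (dr : Int) : Decidable (Pre_gen_ray_mask square df dr) := by
  unfold Pre_gen_ray_mask; infer_instance

def pvWitness_gen_ray_mask : Int × Int × Int := (28, 1, 1)

def Spec_gen_ray_mask (square : Int) (df : Int) (dr : Int) (out : Int) : Prop :=
  out = gen_ray_mask_alt square df dr
instance (square : Int) (df : Int) (dr : Int) (out : Int) : Decidable (Spec_gen_ray_mask square df dr out) := by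
  unfold Spec_gen_ray_mask; infer_instance

-- ===== CLAIM (what is proved, stated in full; the proofs are below) =====
def Claim_equal_gen_ray_mask : Prop := ∀ (square : Int) (df : Int) (dr : Int), Dom_gen_ray_mask square df dr → Pre_gen_ray_mask square df dr → Spec_gen_ray_mask square df dr (gen_ray_mask square df dr)

-- ===== LEMMAS AND PROOFS =====

-- shared recursive shape of both computations: set bits square + s*delta for k steps from `step`
def foldR (square delta : Int) : Nat → Int → Int → Int
  | 0, _, mask => mask
  | k+1, step, mask => foldR square delta k (step + 1)
      (PySem.Int.bor mask ((1 : Int) <<< (square + step * delta).toNat))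

theorem runSteps_nonneg (c d : Int) : 0 ≤ runSteps c d := by
  unfold runSteps
  split_ifs with hd hc hs hp
  · omega
  · omega
  · rw [PySem.Int.le_floordiv_iff_mul_le hp]; omega
  · rw [PySem.Int.le_floordiv_iff_mul_le (by omega : (0:Int) < -d)]; omega
  · omega

theorem runSteps_le_eight (c d : Int) : runSteps c d ≤ 8 := by
  unfold runSteps
  split_ifs with hd hc hs hp
  · omega
  · omega
  · have h9 : PySem.Int.floordiv (7 - c) d < 9 := by
      rw [PySem.Int.floordiv_lt_iff_lt_mul hp]; omega
    omega
  · have h9 : PySem.Int.floordiv c (-d) < 9 := by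
      rw [PySem.Int.floordiv_lt_iff_lt_mul (by omega : (0:Int) < -d)]; omega
    omega
  · omega

theorem coord_ok (c d s : Int) (h1 : 1 ≤ s) (h2 : s ≤ runSteps c d) :
    0 ≤ c + d * s ∧ c + d * s < 8 := by
  unfold runSteps at h2
  split_ifs at h2 with hd hc hs hp
  · subst hd; constructor <;> omega
  · omega
  · rw [PySem.Int.le_floordiv_iff_mul_le hp] at h2
    have hlow : 0 ≤ d * (s - 1) := mul_nonneg hp.le (by omega)
    have hcm : s * d = d * s := mul_comm s d
    constructor <;> nlinarith
  · have hdn : (0:Int) < -d := by omega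
    rw [PySem.Int.le_floordiv_iff_mul_le hdn] at h2
    have hup : d * (s - 1) ≤ 0 := mul_nonpos_of_nonpos_of_nonneg (by omega) (by omega)
    have hcm : s * -d = -(d * s) := by ring
    constructor <;> nlinarith
  · omega

theorem coord_fail (c d : Int) (h : d ≠ 0 ∨ ¬ (0 ≤ c ∧ c < 8)) :
    ¬ (0 ≤ c + d * (runSteps c d + 1) ∧ c + d * (runSteps c d + 1) < 8) := by
  unfold runSteps
  split_ifs with hd hc hs hp
  · intro _; rcases h with h | h
    · exact h hd
    · exact h hc
  · subst hd; intro hcc; omega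
  · intro hcc
    have hq : 7 - c < (PySem.Int.floordiv (7 - c) d + 1) * d := by
      rw [← PySem.Int.floordiv_lt_iff_lt_mul hp]; omega
    nlinarith [hcc.2, hq]
  · intro hcc
    have hdn : (0:Int) < -d := by omega
    have hq : c < (PySem.Int.floordiv c (-d) + 1) * -d := by
      rw [← PySem.Int.floordiv_lt_iff_lt_mul hdn]; omega
    nlinarith [hcc.1, hq]
  · intro hcc; omega

-- the combined bounds check fails at step N+1 (N = min of the two counts), inside Pre_
theorem fail_at_N (square df dr : Int) (hpre : Pre_gen_ray_mask square df dr) :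
    ¬ (0 ≤ PySem.Int.mod square 8 + df * (min (runSteps (PySem.Int.mod square 8) df) (runSteps (PySem.Int.floordiv square 8) dr) + 1) ∧
       PySem.Int.mod square 8 + df * (min (runSteps (PySem.Int.mod square 8) df) (runSteps (PySem.Int.floordiv square 8) dr) + 1) < 8 ∧
       0 ≤ PySem.Int.floordiv square 8 + dr * (min (runSteps (PySem.Int.mod square 8) df) (runSteps (PySem.Int.floordiv square 8) dr) + 1) ∧
       PySem.Int.floordiv square 8 + dr * (min (runSteps (PySem.Int.mod square 8) df) (runSteps (PySem.Int.floordiv square 8) dr) + 1) < 8) := by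
  set f := PySem.Int.mod square 8 with hf
  set r := PySem.Int.floordiv square 8 with hr
  have hsq : r * 8 + f = square := by
    rw [hf, hr]; exact PySem.Int.floordiv_mul_add_mod square 8
  have hfb : 0 ≤ f ∧ f < 8 := by
    rw [hf, PySem.Int.mod_eq_emod_of_pos (by omega)]
    exact ⟨Int.emod_nonneg _ (by omega), Int.emod_lt_of_pos _ (by omega)⟩
  by_cases hdf : df = 0
  · by_cases hdr : dr = 0
    · have hrout : ¬ (0 ≤ r ∧ r < 8) := by
        intro hrin
        exact hpre ⟨hdf, hdr, by omega, by omega⟩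
      subst hdf hdr
      intro hc
      exact hrout ⟨by omega, by omega⟩
    · have h8 : runSteps f df = 8 := by
        rw [hdf]; unfold runSteps; rw [if_pos rfl, if_pos hfb]
      have hmin : min (runSteps f df) (runSteps r dr) = runSteps r dr := by
        have := runSteps_le_eight r dr; omega
      rw [hmin]
      intro hc
      exact coord_fail r dr (Or.inl hdr) ⟨hc.2.2.1, hc.2.2.2⟩
  · by_cases hle : runSteps f df ≤ runSteps r dr
    · have hmin : min (runSteps f df) (runSteps r dr) = runSteps f df := by omega
      rw [hmin]
      intro hc
      exact coord_fail f df (Or.inl hdf) ⟨hc.1, hc.2.1⟩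
    · have hmin : min (runSteps f df) (runSteps r dr) = runSteps r dr := by omega
      rw [hmin]
      by_cases hdr : dr = 0
      · have h08 : runSteps r dr = 0 ∨ runSteps r dr = 8 := by
          rw [hdr]; unfold runSteps; rw [if_pos rfl]; split_ifs <;> simp
        have hle8 := runSteps_le_eight f df
        have h0 : runSteps r dr = 0 := by omega
        have hrout : ¬ (0 ≤ r ∧ r < 8) := by
          intro hrin
          have : runSteps r dr = 8 := by
            rw [hdr]; unfold runSteps; rw [if_pos rfl, if_pos hrin]
          omega
        rw [h0]
        subst hdr
        intro hc
        exact hrout ⟨by omega, by omega⟩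
      · intro hc
        exact coord_fail r dr (Or.inl hdr) ⟨hc.2.2.1, hc.2.2.2⟩

-- A's loop, run with enough fuel from step `step`, equals the unconditional pass foldR
theorem loopA_eq (square df dr : Int) (hpre : Pre_gen_ray_mask square df dr) :
    ∀ (fuel : Nat) (step mask : Int), 1 ≤ step →
      step ≤ min (runSteps (PySem.Int.mod square 8) df) (runSteps (PySem.Int.floordiv square 8) dr) + 1 →
      (min (runSteps (PySem.Int.mod square 8) df) (runSteps (PySem.Int.floordiv square 8) dr) + 1 - step).toNat < fuel →
      genRayLoopA (PySem.Int.mod square 8) (PySem.Int.floordiv square 8) df dr fuel step mask =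
        foldR square (8 * dr + df)
          (min (runSteps (PySem.Int.mod square 8) df) (runSteps (PySem.Int.floordiv square 8) dr) + 1 - step).toNat
          step mask := by
  have hfail := fail_at_N square df dr hpre
  set f := PySem.Int.mod square 8 with hf
  set r := PySem.Int.floordiv square 8 with hr
  set N := min (runSteps f df) (runSteps r dr) with hN
  have hsq : r * 8 + f = square := by
    rw [hf, hr]; exact PySem.Int.floordiv_mul_add_mod square 8
  intro fuel
  induction fuel with
  | zero => intro step mask h1 h2 h3; omega
  | succ m ih =>
    intro step mask h1 h2 h3
    by_cases hstep : step ≤ N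
    · have hokf := coord_ok f df step h1 (le_trans hstep (by omega))
      have hokr := coord_ok r dr step h1 (le_trans hstep (by omega))
      have hbit : (r + dr * step) * 8 + (f + df * step) = square + step * (8 * dr + df) := by
        linear_combination hsq
      have hk : (N + 1 - step).toNat = (N + 1 - (step + 1)).toNat + 1 := by omega
      rw [genRayLoopA, if_pos ⟨hokf.1, hokf.2, hokr.1, hokr.2⟩, hbit, hk, foldR]
      exact ih (step + 1) _ (by omega) (by omega) (by omega)
    · have hstep' : step = N + 1 := by omega
      subst hstep'
      rw [genRayLoopA, if_neg hfail]
      have hz : (N + 1 - (N + 1)).toNat = 0 := by omega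
      rw [hz, foldR]

-- B's fold over range(step, step + k) equals the same unconditional pass
theorem foldB_eq (square delta : Int) :
    ∀ (k : Nat) (step mask : Int),
      (PySem.List.pyRange step (step + (k : Int)) 1).foldl
        (fun m s => PySem.Int.bor m ((1 : Int) <<< (square + s * delta).toNat)) mask =
      foldR square delta k step mask := by
  intro k
  induction k with
  | zero =>
    intro step mask
    rw [PySem.List.pyRange_one_eq_nil (by omega)]
    rfl
  | succ n ih =>
    intro step mask
    push_cast
    rw [PySem.List.pyRange_one_cons (by omega : step < step + ((n : Nat) + 1 : Int))]
    show (PySem.List.pyRange (step + 1) (step + ((n : Nat) + 1 : Int)) 1).foldl _ _ = _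
    have harg : step + ((n : Nat) + 1 : Int) = (step + 1) + (n : Int) := by omega
    rw [harg, ih, foldR]

-- ===== VERDICT (by name: the statement is the Claim_ definition above) =====
theorem gen_ray_mask_spec : Claim_equal_gen_ray_mask := by
  intro square df dr _ hpre
  unfold Spec_gen_ray_mask
  simp only [gen_ray_mask, gen_ray_mask_alt]
  have hN0 : 0 ≤ min (runSteps (PySem.Int.mod square 8) df) (runSteps (PySem.Int.floordiv square 8) dr) :=
    le_min (runSteps_nonneg _ df) (runSteps_nonneg _ dr)
  have hN8 : min (runSteps (PySem.Int.mod square 8) df) (runSteps (PySem.Int.floordiv square 8) dr) ≤ 8 :=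
    le_trans (min_le_left _ _) (runSteps_le_eight _ df)
  have hA := loopA_eq square df dr hpre 64 1 0 (by omega) (by omega) (by omega)
  rw [hA]
  have hB := foldB_eq square (8 * dr + df)
      (min (runSteps (PySem.Int.mod square 8) df) (runSteps (PySem.Int.floordiv square 8) dr)).toNat 1 0
  rw [show (1 : Int) + ((min (runSteps (PySem.Int.mod square 8) df) (runSteps (PySem.Int.floordiv square 8) dr)).toNat : Int)
        = min (runSteps (PySem.Int.mod square 8) df) (runSteps (PySem.Int.floordiv square 8) dr) + 1 from by omega] at hB
  rw [show (min (runSteps (PySem.Int.mod square 8) df) (runSteps (PySem.Int.floordiv square 8) dr) + 1 - 1).toNat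
        = (min (runSteps (PySem.Int.mod square 8) df) (runSteps (PySem.Int.floordiv square 8) dr)).toNat from by omega] at hA ⊢
  rw [hB]
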